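-- pv_equiv track=rewrite | github.com/microsoft/ltp-platform | src/job-exporter/src/container_systemmsg.py | parse_system_msg_stats
-- ===== SOURCE A (Python) =====
-- def parse_system_msg_stats(stats: str):
--     lines = stats.strip().splitlines()
--     system_msgs = set()
--     for data in lines:
--         if "no-retry page fault" in data:
--             system_msgs.add("no-retry page fault")
--         if "amdgpu: trn=2 ACK should not assert! wait again !" in data:
--             system_msgs.add("amdgpu: trn=2 ACK should not assert! wait again !")
--         if "Fence fallback timer expired on ring sdma" in data:
--             system_msgs.add("Fence fallback timer expired on ring sdma")
--         if "GPU reset" in data: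
--             system_msgs.add("GPU reset")
--         if "segfault" in data and "python" not in data:
--             system_msgs.add("segfault")
--
--     return system_msgs
-- ===== SOURCE B (Python) =====
-- def _match(pat, excl, line):
--     return pat in line and (excl is None or excl not in line)
--
--
-- def parse_system_msg_stats(stats: str):
--     # worklist of (pattern, per-line exclusion); a pattern is removed once found
--     remaining = [
--         ("no-retry page fault", None),
--         ("amdgpu: trn=2 ACK should not assert! wait again !", None),
--         ("Fence fallback timer expired on ring sdma", None),
--         ("GPU reset", None),
--         ("segfault", "python"),
--     ]
--     found = []
--     for line in stats.strip().splitlines():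
--         if not remaining:
--             break
--         found += [p for (p, e) in remaining if _match(p, e, line)]
--         remaining = [(p, e) for (p, e) in remaining if not _match(p, e, line)]
--     return set(found)
-- ===== Notes on version B (the rewrite author's own statement) =====
-- stated objective: alternative
-- what changed: Replaces the per-line chain of five hard-coded membership tests accumulating into a set with a table-driven shrinking worklist of (pattern, exclusion) pairs: each line is matched only against the patterns not yet found, found patterns are collected in a duplicate-free list, and the scan stops early once every pattern has been seen.
import Mathlib
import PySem

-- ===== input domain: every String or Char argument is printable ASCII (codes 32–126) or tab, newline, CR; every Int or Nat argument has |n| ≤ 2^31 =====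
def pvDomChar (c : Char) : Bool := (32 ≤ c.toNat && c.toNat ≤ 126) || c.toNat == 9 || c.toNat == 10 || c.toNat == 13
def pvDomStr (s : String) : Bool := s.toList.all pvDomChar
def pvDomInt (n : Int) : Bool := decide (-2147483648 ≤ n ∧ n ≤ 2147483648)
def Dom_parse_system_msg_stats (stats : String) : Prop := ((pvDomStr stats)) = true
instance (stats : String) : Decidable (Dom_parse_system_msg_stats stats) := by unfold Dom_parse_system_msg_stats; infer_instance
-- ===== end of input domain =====

-- B replaces the per-line chain of five hard-coded tests with a table-driven shrinking
-- worklist of (pattern, exclusion) pairs and an early exit once every pattern is found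
-- (objective: alternative decomposition, same exact result).

-- ===== PORT A =====
def parse_system_msg_stats (stats : String) : List String :=
  let lines := PySem.Str.splitlines (PySem.Str.strip stats)
  lines.foldl (fun system_msgs data =>
    let system_msgs := if PySem.Str.isIn "no-retry page fault" data then PySem.Set.add system_msgs "no-retry page fault" else system_msgs
    let system_msgs := if PySem.Str.isIn "amdgpu: trn=2 ACK should not assert! wait again !" data then PySem.Set.add system_msgs "amdgpu: trn=2 ACK should not assert! wait again !" else system_msgs
    let system_msgs := if PySem.Str.isIn "Fence fallback timer expired on ring sdma" data then PySem.Set.add system_msgs "Fence fallback timer expired on ring sdma" else system_msgs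
    let system_msgs := if PySem.Str.isIn "GPU reset" data then PySem.Set.add system_msgs "GPU reset" else system_msgs
    let system_msgs := if PySem.Str.isIn "segfault" data && !PySem.Str.isIn "python" data then PySem.Set.add system_msgs "segfault" else system_msgs
    system_msgs) PySem.Set.empty

-- ===== PORT B =====
def pvPatterns : List (String × Option String) :=
  [("no-retry page fault", none),
   ("amdgpu: trn=2 ACK should not assert! wait again !", none),
   ("Fence fallback timer expired on ring sdma", none),
   ("GPU reset", none),
   ("segfault", some "python")]

def pvMatch (pat : String) (excl : Option String) (line : String) : Bool :=
  PySem.Str.isIn pat line && (match excl with | none => true | some e => !PySem.Str.isIn e line)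

def pvScan (lines : List String) (found : List String)
    (remaining : List (String × Option String)) : List String :=
  match lines with
  | [] => found
  | line :: rest =>
    if remaining.isEmpty then found
    else pvScan rest (found ++ (remaining.filter (fun pe => pvMatch pe.1 pe.2 line)).map Prod.fst)
                     (remaining.filter (fun pe => !pvMatch pe.1 pe.2 line))

def parse_system_msg_stats_alt (stats : String) : List String :=
  PySem.Set.ofList (pvScan (PySem.Str.splitlines (PySem.Str.strip stats)) [] pvPatterns)

-- ===== PRECONDITION & SPEC =====
def Spec_parse_system_msg_stats (stats : String) (out : List String) : Prop := out = parse_system_msg_stats_alt stats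
instance (stats : String) (out : List String) : Decidable (Spec_parse_system_msg_stats stats out) := by unfold Spec_parse_system_msg_stats; infer_instance

-- ===== CLAIM (what is proved, stated in full; the proofs are below) =====
def Claim_equal_parse_system_msg_stats : Prop := ∀ (stats : String), Dom_parse_system_msg_stats stats → Spec_parse_system_msg_stats stats (parse_system_msg_stats stats)

-- ===== LEMMAS AND PROOFS =====

-- A's per-line body, as a named step function
def pvStepA (s : List String) (data : String) : List String :=
  let s := if PySem.Str.isIn "no-retry page fault" data then PySem.Set.add s "no-retry page fault" else s
  let s := if PySem.Str.isIn "amdgpu: trn=2 ACK should not assert! wait again !" data then PySem.Set.add s "amdgpu: trn=2 ACK should not assert! wait again !" else s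
  let s := if PySem.Str.isIn "Fence fallback timer expired on ring sdma" data then PySem.Set.add s "Fence fallback timer expired on ring sdma" else s
  let s := if PySem.Str.isIn "GPU reset" data then PySem.Set.add s "GPU reset" else s
  let s := if PySem.Str.isIn "segfault" data && !PySem.Str.isIn "python" data then PySem.Set.add s "segfault" else s
  s

theorem parse_eq_foldl_stepA (stats : String) :
    parse_system_msg_stats stats =
      (PySem.Str.splitlines (PySem.Str.strip stats)).foldl pvStepA [] := rfl

theorem pvScan_cons (line : String) (rest : List String) (found : List String)
    (remaining : List (String × Option String)) :
    pvScan (line :: rest) found remaining =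
      if remaining.isEmpty then found
      else pvScan rest (found ++ (remaining.filter (fun pe => pvMatch pe.1 pe.2 line)).map Prod.fst)
                       (remaining.filter (fun pe => !pvMatch pe.1 pe.2 line)) := rfl

-- A's per-line body is the fold of the pattern table
theorem stepA_eq_foldl (s : List String) (line : String) :
    pvStepA s line =
      pvPatterns.foldl (fun s pe => if pvMatch pe.1 pe.2 line then PySem.Set.add s pe.1 else s) s := by
  simp only [pvStepA, pvPatterns, pvMatch, List.foldl_cons, List.foldl_nil, Bool.and_true]

-- folding the table from `found` appends exactly the matching names not yet present
theorem foldl_table_eq (ps : List (String × Option String)) (line : String) :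
    ∀ found : List String, (ps.map Prod.fst).Nodup →
      ps.foldl (fun s pe => if pvMatch pe.1 pe.2 line then PySem.Set.add s pe.1 else s) found
        = found ++ ((ps.filter (fun pe => pvMatch pe.1 pe.2 line && !(found.contains pe.1))).map Prod.fst) := by
  induction ps with
  | nil => intro found _; simp
  | cons pe tl ih =>
    intro found hnd
    have hnd' : (tl.map Prod.fst).Nodup := (List.nodup_cons.mp (by simpa using hnd)).2
    have hpe : pe.1 ∉ tl.map Prod.fst := (List.nodup_cons.mp (by simpa using hnd)).1
    by_cases hm : pvMatch pe.1 pe.2 line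
    · by_cases hc : pe.1 ∈ found
      · simp [List.foldl_cons, hm, ih found hnd', hc]
      · have hadd : PySem.Set.add found pe.1 = found ++ [pe.1] := PySem.Set.add_of_not_mem hc
        have heq : tl.filter (fun x => pvMatch x.1 x.2 line && !((found ++ [pe.1]).contains x.1))
            = tl.filter (fun x => pvMatch x.1 x.2 line && !(found.contains x.1)) := by
          apply List.filter_congr
          intro x hx
          have hxne : x.1 ≠ pe.1 := by
            intro h; exact hpe (h ▸ List.mem_map_of_mem hx)
          simp [hxne]
        simp only [List.foldl_cons, hm, if_pos, hadd, ih (found ++ [pe.1]) hnd', heq]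
        simp [hm, hc]
    · simp [List.foldl_cons, hm, ih found hnd']

theorem pvPatterns_names_nodup : (pvPatterns.map Prod.fst).Nodup := by decide

-- once every pattern name is already collected, further lines change nothing
theorem foldl_stepA_saturated (lines : List String) :
    ∀ found : List String, (∀ pe ∈ pvPatterns, pe.1 ∈ found) →
      lines.foldl pvStepA found = found := by
  induction lines with
  | nil => intro found _; rfl
  | cons line rest ih =>
    intro found hall
    have hstep : pvStepA found line = found := by
      rw [stepA_eq_foldl, foldl_table_eq _ _ _ pvPatterns_names_nodup]
      have hnil : pvPatterns.filter (fun pe => pvMatch pe.1 pe.2 line && !(found.contains pe.1)) = [] := by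
        rw [List.filter_eq_nil_iff]
        rintro ⟨a, b⟩ hab
        have := hall ⟨a, b⟩ hab
        simp_all
      rw [hnil]
      simp
    rw [List.foldl_cons, hstep, ih found hall]

-- main invariant: A's fold equals B's worklist scan
theorem foldl_stepA_eq_pvScan (lines : List String) :
    ∀ found : List String,
      lines.foldl pvStepA found
        = pvScan lines found (pvPatterns.filter (fun pe => !(found.contains pe.1))) := by
  induction lines with
  | nil => intro found; rfl
  | cons line rest ih =>
    intro found
    rw [pvScan_cons]
    by_cases hemp : (pvPatterns.filter (fun pe => !(found.contains pe.1))).isEmpty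
    · rw [if_pos hemp]
      apply foldl_stepA_saturated
      intro pe hpe
      have := List.filter_eq_nil_iff.mp (List.isEmpty_iff.mp hemp) pe hpe
      simpa using this
    · rw [if_neg hemp]
      have hstep : pvStepA found line
          = found ++ ((pvPatterns.filter (fun pe => !(found.contains pe.1))).filter
              (fun pe => pvMatch pe.1 pe.2 line)).map Prod.fst := by
        rw [stepA_eq_foldl, foldl_table_eq _ _ _ pvPatterns_names_nodup, List.filter_filter]
      set found' := found ++ ((pvPatterns.filter (fun pe => !(found.contains pe.1))).filter
              (fun pe => pvMatch pe.1 pe.2 line)).map Prod.fst with hfound'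
      have hrem : pvPatterns.filter (fun pe => !(found'.contains pe.1))
          = (pvPatterns.filter (fun pe => !(found.contains pe.1))).filter
              (fun pe => !pvMatch pe.1 pe.2 line) := by
        rw [List.filter_filter]
        apply List.filter_congr
        intro pe hpe
        have hinj := List.inj_on_of_nodup_map pvPatterns_names_nodup
        rw [hfound']
        by_cases hc : pe.1 ∈ found
        · simp [hc]
        · cases hm : pvMatch pe.1 pe.2 line
          · simp [hc]
            intro x hx
            have hexp : ((pe.1, x) : String × Option String) = pe := hinj hx hpe rfl
            have hx2 : x = pe.2 := by rw [← hexp]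
            rw [hx2]
            exact hm
          · simp [hc]
            exact ⟨pe.2, by simpa using hpe, hm⟩
      rw [List.foldl_cons, hstep, ih found', hrem]

-- pvScan preserves Nodup of found ++ remaining names
theorem pvScan_nodup (lines : List String) :
    ∀ (found : List String) (remaining : List (String × Option String)),
      (found ++ remaining.map Prod.fst).Nodup → (pvScan lines found remaining).Nodup := by
  induction lines with
  | nil => intro found remaining h; exact (List.nodup_append.mp h).1
  | cons line rest ih =>
    intro found remaining h
    rw [pvScan_cons]
    by_cases hemp : remaining.isEmpty
    · rw [if_pos hemp]; exact (List.nodup_append.mp h).1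
    · rw [if_neg hemp]
      apply ih
      have hperm : ((found ++ (remaining.filter (fun pe => pvMatch pe.1 pe.2 line)).map Prod.fst)
            ++ (remaining.filter (fun pe => !pvMatch pe.1 pe.2 line)).map Prod.fst).Perm
          (found ++ remaining.map Prod.fst) := by
        rw [List.append_assoc]
        apply List.Perm.append_left
        rw [← List.map_append]
        exact List.Perm.map _ (List.filter_append_perm _ _)
      exact hperm.nodup_iff.mpr h

theorem pvScan_from_nil (lines : List String) :
    lines.foldl pvStepA [] = pvScan lines [] pvPatterns := by
  have h := foldl_stepA_eq_pvScan lines []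
  simpa using h

-- ===== VERDICT (by name: the statement is the Claim_ definition above) =====
theorem parse_system_msg_stats_spec : Claim_equal_parse_system_msg_stats := by
  intro stats _
  unfold Spec_parse_system_msg_stats parse_system_msg_stats_alt
  rw [parse_eq_foldl_stepA, pvScan_from_nil, PySem.Set.ofList_eq_self_of_nodup]
  apply pvScan_nodup
  simpa using pvPatterns_names_nodup
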